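-- pv_equiv track=rewrite | github.com/pollinnshh/EGE | домашка (на 4 марта)/task-25-2716.py | f
-- ===== SOURCE A (Python) =====
-- def f(num):
--     res = []
--     for i in range(2, num // 2 + 1):
--         if num % i == 0:
--             res.append(i)
--
--     res = sorted(set(res))
--     if len(res) < 3:
--         return 0
--
--     s = res[-1] + res[-2] + res[-3]
--     if s % 2022 == 0 and s != num:
--         return s
-- ===== SOURCE B (Python) =====
-- def f(num):
--     divs = set()
--     i = 2
--     while i * i <= num:
--         if num % i == 0:
--             divs.add(i)
--             divs.add(num // i)
--         i += 1
--
--     res = sorted(divs)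
--     if len(res) < 3:
--         return 0
--
--     s = res[-1] + res[-2] + res[-3]
--     if s % 2022 == 0 and s != num:
--         return s
-- ===== Notes on version B (the rewrite author's own statement) =====
-- stated objective: faster
-- what changed: B enumerates divisors only up to sqrt(num), adding each small divisor i together with its cofactor num//i, instead of scanning every candidate up to num//2.
import Mathlib
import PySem

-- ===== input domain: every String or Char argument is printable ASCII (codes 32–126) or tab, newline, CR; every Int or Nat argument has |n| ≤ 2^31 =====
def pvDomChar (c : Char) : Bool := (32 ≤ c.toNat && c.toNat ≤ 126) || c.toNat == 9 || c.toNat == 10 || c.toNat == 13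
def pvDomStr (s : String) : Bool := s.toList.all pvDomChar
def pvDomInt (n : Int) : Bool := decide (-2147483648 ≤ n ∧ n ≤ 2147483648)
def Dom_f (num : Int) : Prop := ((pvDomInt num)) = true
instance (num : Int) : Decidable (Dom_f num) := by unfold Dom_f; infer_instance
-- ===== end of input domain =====

-- B enumerates divisors only up to sqrt(num), pairing each small divisor with its cofactor,
-- instead of A's scan of every candidate up to num//2 (objective: faster, asymptotic).

-- ===== PORT A =====
def f (num : Int) : Option Int :=
  let res : List Int :=
    (PySem.List.pyRange 2 (PySem.Int.floordiv num 2 + 1) 1).foldl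
      (fun acc i => if PySem.Int.mod num i == 0 then acc ++ [i] else acc) []
  let res := PySem.List.sorted (PySem.Set.ofList res) (fun x => x) false
  if res.length < 3 then some 0
  else
    -- res[-1], res[-2], res[-3]: in range here since len ≥ 3, so getD never takes its default
    let s := (PySem.List.pyGet? res (-1)).getD 0 + (PySem.List.pyGet? res (-2)).getD 0 +
             (PySem.List.pyGet? res (-3)).getD 0
    if PySem.Int.mod s 2022 == 0 && s != num then some s else none

-- ===== PORT B =====
-- the 'while i * i <= num' loop of Source B
def fAltLoop (num i : Int) (divs : PySem.Set Int) : PySem.Set Int :=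
  if h : i * i ≤ num then
    fAltLoop num (i + 1)
      (if PySem.Int.mod num i == 0 then
        PySem.Set.add (PySem.Set.add divs i) (PySem.Int.floordiv num i)
      else divs)
  else divs
termination_by (num + 1 - i).toNat
decreasing_by
  have : i ≤ num := by nlinarith [sq_nonneg i, sq_nonneg (i - 1)]
  omega

def f_alt (num : Int) : Option Int :=
  let divs := fAltLoop num 2 PySem.Set.empty
  let res := PySem.List.sorted divs (fun x => x) false
  if res.length < 3 then some 0
  else
    let s := (PySem.List.pyGet? res (-1)).getD 0 + (PySem.List.pyGet? res (-2)).getD 0 +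
             (PySem.List.pyGet? res (-3)).getD 0
    if PySem.Int.mod s 2022 == 0 && s != num then some s else none

-- ===== PRECONDITION & SPEC =====
def Spec_f (num : Int) (out : Option Int) : Prop := out = f_alt num
instance (num : Int) (out : Option Int) : Decidable (Spec_f num out) := by unfold Spec_f; infer_instance

-- ===== CLAIM (what is proved, stated in full; the proofs are below) =====
def Claim_equal_f : Prop := ∀ (num : Int), Dom_f num → Spec_f num (f num)

-- ===== LEMMAS AND PROOFS =====

-- membership in B's loop result
theorem mem_fAltLoop (num : Int) (x : Int) : ∀ (i : Int) (divs : PySem.Set Int), 1 ≤ i →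
    (x ∈ fAltLoop num i divs ↔
      x ∈ divs ∨ ∃ j, i ≤ j ∧ j * j ≤ num ∧ PySem.Int.mod num j = 0 ∧
        (x = j ∨ x = PySem.Int.floordiv num j)) := by
  intro i divs
  fun_induction fAltLoop num i divs with
  | case1 i divs h ih =>
    intro hi
    simp only [dite_eq_ite] at ih
    rw [ih (by omega)]
    by_cases hc : (PySem.Int.mod num i == 0) = true
    · simp only [hc, if_true, PySem.Set.mem_add]
      constructor
      · rintro (((hd | rfl) | rfl) | ⟨j, hj1, hj2, hj3, hj4⟩)
        · exact Or.inl hd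
        · exact Or.inr ⟨x, le_refl x, h, by simpa using hc, Or.inl rfl⟩
        · exact Or.inr ⟨i, le_refl i, h, by simpa using hc, Or.inr rfl⟩
        · exact Or.inr ⟨j, by omega, hj2, hj3, hj4⟩
      · rintro (hd | ⟨j, hj1, hj2, hj3, hj4⟩)
        · exact Or.inl (Or.inl (Or.inl hd))
        · rcases eq_or_lt_of_le hj1 with rfl | hlt
          · rcases hj4 with rfl | rfl
            · exact Or.inl (Or.inl (Or.inr rfl))
            · exact Or.inl (Or.inr rfl)
          · exact Or.inr ⟨j, by omega, hj2, hj3, hj4⟩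
    · simp only [hc]
      constructor
      · rintro (hd | ⟨j, hj1, hj2, hj3, hj4⟩)
        · exact Or.inl hd
        · exact Or.inr ⟨j, by omega, hj2, hj3, hj4⟩
      · rintro (hd | ⟨j, hj1, hj2, hj3, hj4⟩)
        · exact Or.inl hd
        · rcases eq_or_lt_of_le hj1 with rfl | hlt
          · exact absurd (by simpa using hj3) (by simpa using hc)
          · exact Or.inr ⟨j, by omega, hj2, hj3, hj4⟩
  | case2 i divs h =>
    intro hi
    constructor
    · exact Or.inl
    · rintro (hd | ⟨j, hj1, hj2, hj3, hj4⟩)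
      · exact hd
      · exact absurd hj2 (by nlinarith)

theorem nodup_fAltLoop (num : Int) : ∀ (i : Int) (divs : PySem.Set Int),
    divs.Nodup → (fAltLoop num i divs).Nodup := by
  intro i divs
  fun_induction fAltLoop num i divs with
  | case1 i divs h ih =>
    intro hnd
    apply ih
    by_cases hc : (PySem.Int.mod num i == 0) = true
    · simpa [hc] using PySem.Set.nodup_add _ _ (PySem.Set.nodup_add _ _ hnd)
    · simpa [hc] using hnd
  | case2 i divs h => exact id

-- the arithmetic core: d is a divisor in [2, num//2] iff it shows up in the sqrt enumeration
theorem divisor_characterization (num x : Int) :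
    (2 ≤ x ∧ x < PySem.Int.floordiv num 2 + 1 ∧ PySem.Int.mod num x = 0) ↔
    (∃ j, 2 ≤ j ∧ j * j ≤ num ∧ PySem.Int.mod num j = 0 ∧
      (x = j ∨ x = PySem.Int.floordiv num j)) := by
  constructor
  · rintro ⟨hx2, hxlt, hmod⟩
    have hxd : x ∣ num := (PySem.Int.mod_eq_zero_iff_dvd num x).mp hmod
    have hx2n : x * 2 ≤ num := by
      have := (PySem.Int.le_floordiv_iff_mul_le (a := num) (b := 2) (q := x) (by omega)).mp (by omega)
      omega
    obtain ⟨c, hc⟩ := hxd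
    have hxpos : 0 < x := by omega
    have hc2 : 2 ≤ c := by nlinarith
    by_cases hsq : x * x ≤ num
    · exact ⟨x, hx2, hsq, hmod, Or.inl rfl⟩
    · refine ⟨c, hc2, by nlinarith, ?_, Or.inr ?_⟩
      · exact (PySem.Int.mod_eq_zero_iff_dvd num c).mpr ⟨x, by linarith [hc, mul_comm x c]⟩
      · rw [PySem.Int.floordiv_eq_ediv_of_pos (by omega), hc, mul_comm x c,
          Int.mul_ediv_cancel_left x (by omega)]
  · rintro ⟨j, hj2, hjsq, hjmod, (rfl | rfl)⟩
    · refine ⟨hj2, ?_, hjmod⟩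
      have : x ≤ PySem.Int.floordiv num 2 :=
        (PySem.Int.le_floordiv_iff_mul_le (by omega)).mpr (by nlinarith)
      omega
    · have hjd : j ∣ num := (PySem.Int.mod_eq_zero_iff_dvd num j).mp hjmod
      obtain ⟨c, hc⟩ := hjd
      have hcq : PySem.Int.floordiv num j = c := by
        rw [PySem.Int.floordiv_eq_ediv_of_pos (by omega), hc,
          Int.mul_ediv_cancel_left c (by omega)]
      rw [hcq]
      have hc2 : 2 ≤ c := by nlinarith
      refine ⟨hc2, ?_, (PySem.Int.mod_eq_zero_iff_dvd num c).mpr ⟨j, by linarith [hc, mul_comm j c]⟩⟩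
      have : c ≤ PySem.Int.floordiv num 2 :=
        (PySem.Int.le_floordiv_iff_mul_le (by omega)).mpr (by nlinarith)
      omega

theorem sorted_eq (num : Int) :
    PySem.List.sorted (PySem.Set.ofList
      ((PySem.List.pyRange 2 (PySem.Int.floordiv num 2 + 1) 1).foldl
        (fun acc i => if PySem.Int.mod num i == 0 then acc ++ [i] else acc) [])) (fun x => x) false
    = PySem.List.sorted (fAltLoop num 2 PySem.Set.empty) (fun x => x) false := by
  apply PySem.List.sorted_eq_sorted_of_perm _ _ _ (fun a b hab => hab)
  rw [List.perm_ext_iff_of_nodup (PySem.Set.nodup_ofList _)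
    (nodup_fAltLoop num 2 PySem.Set.empty List.nodup_nil)]
  intro x
  rw [PySem.Set.mem_ofList, mem_fAltLoop num x 2 PySem.Set.empty (by omega),
    PySem.List.foldl_append_if (fun i => PySem.Int.mod num i == 0) (fun i => i)]
  simp only [List.nil_append, List.map_id', List.mem_filter, PySem.List.mem_pyRange_one,
    PySem.Set.empty, List.not_mem_nil, false_or, beq_iff_eq, and_assoc]
  exact divisor_characterization num x

-- ===== VERDICT (by name: the statement is the Claim_ definition above) =====
theorem f_spec : Claim_equal_f := by
  intro num _
  unfold Spec_f f f_alt
  simp only [sorted_eq num]
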